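-- pv_equiv track=rewrite | github.com/bernabe05rodriguez-stack/SMS-V.1- | core/excel_processor.py | collect_numbers
-- ===== SOURCE A (Python) =====
-- def collect_numbers(contacts, allowed_phone_fields=None):
--     """Extrae una lista de números únicos según los campos seleccionados."""
--     if not contacts:
--         return []
--
--     allowed = set(allowed_phone_fields or [])
--
--     numbers = {
--         str(contact.get('Telefono_1', '')).strip()
--         for contact in contacts
--         if str(contact.get('Telefono_1', '')).strip()
--         and (
--             not allowed
--             or contact.get('Telefono_origen', 'Telefono_1') in allowed
--         )
--     }
--
--     return sorted(numbers)
-- ===== SOURCE B (Python) =====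
-- def _insert_sorted_unique(acc, t):
--     """Insert t into the sorted duplicate-free list acc, keeping it sorted and duplicate-free."""
--     if not acc:
--         return [t]
--     head = acc[0]
--     if t < head:
--         return [t] + acc
--     if t == head:
--         return acc
--     return [head] + _insert_sorted_unique(acc[1:], t)
--
--
-- def collect_numbers(contacts, allowed_phone_fields=None):
--     """Extrae una lista de números únicos según los campos seleccionados."""
--     if not contacts:
--         return []
--
--     allowed = allowed_phone_fields or []
--
--     result = []
--     for contact in contacts:
--         t = str(contact.get('Telefono_1', '')).strip()
--         if t and (
--             not allowed
--             or contact.get('Telefono_origen', 'Telefono_1') in allowed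
--         ):
--             result = _insert_sorted_unique(result, t)
--     return result
-- ===== Notes on version B (the rewrite author's own statement) =====
-- stated objective: alternative
-- what changed: B never builds a set and never calls sort: it makes a single pass over the contacts maintaining a sorted duplicate-free list as its only state, placing each qualifying stripped number by a recursive ordered insertion (skipping it when already present), whereas A accumulates a hash set and sorts it at the end.
import Mathlib
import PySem

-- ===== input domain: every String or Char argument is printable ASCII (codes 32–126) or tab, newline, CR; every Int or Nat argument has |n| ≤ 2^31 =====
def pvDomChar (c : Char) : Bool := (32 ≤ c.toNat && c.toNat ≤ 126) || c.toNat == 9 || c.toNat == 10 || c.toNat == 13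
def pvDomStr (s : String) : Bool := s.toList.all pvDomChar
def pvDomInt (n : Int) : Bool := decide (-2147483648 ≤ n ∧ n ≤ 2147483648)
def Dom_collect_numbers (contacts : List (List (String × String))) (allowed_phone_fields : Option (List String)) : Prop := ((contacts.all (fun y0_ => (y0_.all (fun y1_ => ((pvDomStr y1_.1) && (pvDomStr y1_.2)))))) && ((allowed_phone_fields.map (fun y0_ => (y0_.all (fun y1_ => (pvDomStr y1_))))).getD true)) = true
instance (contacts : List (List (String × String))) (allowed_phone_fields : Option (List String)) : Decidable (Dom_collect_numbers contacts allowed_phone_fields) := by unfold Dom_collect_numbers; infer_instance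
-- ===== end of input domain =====

-- B replaces A's set-then-sort by one pass that maintains a sorted duplicate-free list via recursive
-- ordered insertion (no set, no final sort); an alternative of similar cost.


-- ===== PORT A =====
def pvTel1 (contact : List (String × String)) : String :=
  PySem.Str.strip (PySem.Dict.getD (PySem.Dict.ofList contact) "Telefono_1" "")

def pvOrigen (contact : List (String × String)) : String :=
  PySem.Dict.getD (PySem.Dict.ofList contact) "Telefono_origen" "Telefono_1"

-- step of A's set comprehension: add the stripped number to the set when it qualifies
def pvSetStep (allowed : PySem.Set String) (s : PySem.Set String) (contact : List (String × String)) : PySem.Set String :=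
  if pvTel1 contact ≠ "" ∧ (allowed = [] ∨ PySem.Set.contains allowed (pvOrigen contact))
  then PySem.Set.add s (pvTel1 contact) else s

def collect_numbers (contacts : List (List (String × String))) (allowed_phone_fields : Option (List String)) : List String :=
  if contacts = [] then []
  else
    let allowed : PySem.Set String := PySem.Set.ofList (allowed_phone_fields.getD [])
    let numbers : PySem.Set String := contacts.foldl (pvSetStep allowed) PySem.Set.empty
    PySem.List.sorted numbers (fun x => x) false

-- ===== PORT B =====
-- B's recursive helper: insert t into the sorted duplicate-free list acc
def pvInsSU : List String → String → List String
  | [], t => [t]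
  | h :: rest, t =>
    if t < h then t :: h :: rest
    else if t = h then h :: rest
    else h :: pvInsSU rest t

-- step of B's single loop: ordered-insert the stripped number when it qualifies
def pvInsStep (allowed : List String) (acc : List String) (contact : List (String × String)) : List String :=
  if pvTel1 contact ≠ "" ∧ (allowed = [] ∨ pvOrigen contact ∈ allowed)
  then pvInsSU acc (pvTel1 contact) else acc

def collect_numbers_alt (contacts : List (List (String × String))) (allowed_phone_fields : Option (List String)) : List String :=
  if contacts = [] then []
  else
    let allowed : List String := allowed_phone_fields.getD []
    contacts.foldl (pvInsStep allowed) []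

-- ===== PRECONDITION & SPEC =====
def Spec_collect_numbers (contacts : List (List (String × String))) (allowed_phone_fields : Option (List String)) (out : List String) : Prop := out = collect_numbers_alt contacts allowed_phone_fields
instance (contacts : List (List (String × String))) (allowed_phone_fields : Option (List String)) (out : List String) : Decidable (Spec_collect_numbers contacts allowed_phone_fields out) := by unfold Spec_collect_numbers; infer_instance

-- ===== CLAIM (what is proved, stated in full; the proofs are below) =====
def Claim_equal_collect_numbers : Prop := ∀ (contacts : List (List (String × String))) (allowed_phone_fields : Option (List String)), Dom_collect_numbers contacts allowed_phone_fields → Spec_collect_numbers contacts allowed_phone_fields (collect_numbers contacts allowed_phone_fields)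

-- ===== LEMMAS AND PROOFS =====

-- the numbers a contact contributes (B's condition phrased on the raw allowed list)
def pvQ1 (apf : List String) (c : List (String × String)) : List String :=
  if pvTel1 c ≠ "" ∧ (apf = [] ∨ pvOrigen c ∈ apf) then [pvTel1 c] else []

def pvQual (apf : List String) (contacts : List (List (String × String))) : List String :=
  contacts.flatMap (pvQ1 apf)

theorem ofList_eq_nil_iff (xs : List String) : PySem.Set.ofList xs = [] ↔ xs = [] := by
  cases xs with
  | nil => simp [PySem.Set.ofList_nil]
  | cons x t => simp [PySem.Set.ofList_cons]

-- A's one-contact step adds to the set exactly the numbers pvQ1 lists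
theorem setStep_eq_update (apf : List String) (s : PySem.Set String) (c : List (String × String)) :
    pvSetStep (PySem.Set.ofList apf) s c = PySem.Set.update s (pvQ1 apf c) := by
  unfold pvSetStep pvQ1
  have hmem : PySem.Set.contains (PySem.Set.ofList apf) (pvOrigen c) = true ↔ pvOrigen c ∈ apf := by
    rw [PySem.Set.contains_iff, PySem.Set.mem_ofList]
  have hnil := ofList_eq_nil_iff apf
  have hiff : (pvTel1 c ≠ "" ∧ (PySem.Set.ofList apf = [] ∨ PySem.Set.contains (PySem.Set.ofList apf) (pvOrigen c) = true))
      ↔ (pvTel1 c ≠ "" ∧ (apf = [] ∨ pvOrigen c ∈ apf)) := by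
    constructor
    · rintro ⟨h, hor⟩; exact ⟨h, hor.imp hnil.mp hmem.mp⟩
    · rintro ⟨h, hor⟩; exact ⟨h, hor.imp hnil.mpr hmem.mpr⟩
  by_cases hA : pvTel1 c ≠ "" ∧ (PySem.Set.ofList apf = [] ∨ PySem.Set.contains (PySem.Set.ofList apf) (pvOrigen c) = true)
  · rw [if_pos hA, if_pos (hiff.mp hA)]
    simp [PySem.Set.update_cons, PySem.Set.update_nil]
  · rw [if_neg hA, if_neg (fun h => hA (hiff.mpr h))]
    simp [PySem.Set.update_nil]

-- A's set fold is Set.update with the whole qualifying list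
theorem setFold_eq_update (apf : List String) (contacts : List (List (String × String))) :
    ∀ (s : PySem.Set String),
    contacts.foldl (pvSetStep (PySem.Set.ofList apf)) s = PySem.Set.update s (pvQual apf contacts) := by
  induction contacts with
  | nil => intro s; simp [pvQual, PySem.Set.update_nil]
  | cons c cs ih =>
    intro s
    simp only [List.foldl_cons, ih, setStep_eq_update]
    rw [show pvQual apf (c :: cs) = pvQ1 apf c ++ pvQual apf cs from by simp only [pvQual, List.flatMap_cons],
        PySem.Set.update_append]

-- B's recursive insertion keeps the list strictly sorted and adds exactly t to its members
theorem insSU_inv (t : String) : ∀ (acc : List String), acc.Pairwise (· < ·) →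
    (pvInsSU acc t).Pairwise (· < ·) ∧ (∀ a, a ∈ pvInsSU acc t ↔ a = t ∨ a ∈ acc) := by
  intro acc
  induction acc with
  | nil => intro _; constructor <;> simp [pvInsSU]
  | cons h rest ih =>
    intro hp
    have hp' := List.pairwise_cons.mp hp
    unfold pvInsSU
    by_cases h1 : t < h
    · rw [if_pos h1]
      refine ⟨List.pairwise_cons.mpr ⟨?_, hp⟩, by simp⟩
      intro b hb
      rcases List.mem_cons.mp hb with rfl | hb'
      · exact h1
      · exact lt_trans h1 (hp'.1 b hb')
    · rw [if_neg h1]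
      by_cases h2 : t = h
      · rw [if_pos h2]; exact ⟨hp, fun a => by simp [h2]⟩
      · rw [if_neg h2]
        obtain ⟨ih1, ih2⟩ := ih hp'.2
        have hht : h < t := lt_of_le_of_ne (le_of_not_gt h1) (fun e => h2 e.symm)
        refine ⟨List.pairwise_cons.mpr ⟨?_, ih1⟩, fun a => by simp [ih2]; tauto⟩
        intro b hb
        rcases (ih2 b).mp hb with rfl | hb'
        · exact hht
        · exact hp'.1 b hb'

-- invariant of B's loop: the accumulator stays strictly sorted, members = old members ∪ qualifying numbers
theorem insFold_inv (apf : List String) (contacts : List (List (String × String))) :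
    ∀ (acc : List String), acc.Pairwise (· < ·) →
    (contacts.foldl (pvInsStep apf) acc).Pairwise (· < ·) ∧
    (∀ a, a ∈ contacts.foldl (pvInsStep apf) acc ↔ a ∈ acc ∨ a ∈ pvQual apf contacts) := by
  induction contacts with
  | nil => intro acc hacc; exact ⟨hacc, fun a => by simp [pvQual]⟩
  | cons c cs ih =>
    intro acc hacc
    have hq : pvQual apf (c :: cs) = pvQ1 apf c ++ pvQual apf cs := by
      simp only [pvQual, List.flatMap_cons]
    simp only [List.foldl_cons]
    by_cases hc : pvTel1 c ≠ "" ∧ (apf = [] ∨ pvOrigen c ∈ apf)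
    · rw [show pvInsStep apf acc c = pvInsSU acc (pvTel1 c) from by unfold pvInsStep; rw [if_pos hc]]
      obtain ⟨hi1, hi2⟩ := insSU_inv (pvTel1 c) acc hacc
      obtain ⟨h1, h2⟩ := ih (pvInsSU acc (pvTel1 c)) hi1
      refine ⟨h1, fun a => ?_⟩
      have hmq : pvQ1 apf c = [pvTel1 c] := by unfold pvQ1; rw [if_pos hc]
      rw [h2 a, hi2 a, hq, hmq, List.mem_append, List.mem_singleton]
      constructor
      · rintro ((h | h) | h)
        · exact Or.inr (Or.inl h)
        · exact Or.inl h
        · exact Or.inr (Or.inr h)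
      · rintro (h | h | h)
        · exact Or.inl (Or.inr h)
        · exact Or.inl (Or.inl h)
        · exact Or.inr h
    · rw [show pvInsStep apf acc c = acc from by unfold pvInsStep; rw [if_neg hc]]
      obtain ⟨h1, h2⟩ := ih acc hacc
      refine ⟨h1, fun a => ?_⟩
      have hmq : pvQ1 apf c = [] := by unfold pvQ1; rw [if_neg hc]
      rw [h2 a, hq, hmq, List.nil_append]

-- ===== VERDICT (by name: the statement is the Claim_ definition above) =====
theorem collect_numbers_spec : Claim_equal_collect_numbers := by
  intro contacts apf _
  unfold Spec_collect_numbers collect_numbers collect_numbers_alt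
  by_cases hc : contacts = []
  · simp [hc]
  · simp only [hc, if_false]
    have hA : contacts.foldl (pvSetStep (PySem.Set.ofList (apf.getD []))) PySem.Set.empty
        = PySem.Set.ofList (pvQual (apf.getD []) contacts) := by
      rw [setFold_eq_update, PySem.Set.ofList_eq_foldl]; rfl
    rw [hA]
    obtain ⟨hB1, hB2⟩ := insFold_inv (apf.getD []) contacts [] (by simp)
    have hnd : (contacts.foldl (pvInsStep (apf.getD [])) []).Nodup :=
      hB1.imp (fun h => ne_of_lt h)
    have hperm : (contacts.foldl (pvInsStep (apf.getD [])) []).Perm (PySem.Set.ofList (pvQual (apf.getD []) contacts)) := by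
      refine (List.perm_ext_iff_of_nodup hnd (PySem.Set.nodup_ofList _)).mpr ?_
      intro a
      rw [hB2 a, PySem.Set.mem_ofList]; simp
    exact PySem.List.sorted_eq_of_perm_of_pairwise_lt (PySem.Set.ofList (pvQual (apf.getD []) contacts))
      (contacts.foldl (pvInsStep (apf.getD [])) []) (fun x => x) hperm hB1
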